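-- pv_equiv track=rewrite | github.com/bssrdf/pyleet | M/MaximumPointsinanArcheryCompetition.py | maximumBobPoints2
-- ===== SOURCE A (Python) =====
-- from typing import List
-- from functools import lru_cache
--
-- def maximumBobPoints2(numArrows: int, aliceArrows: List[int]) -> List[int]:
--     @lru_cache(None)
--     def dp(k, numArrows):
--         if k == 12 or numArrows <= 0:
--             return 0
--
--         maxScore = dp(k+1, numArrows)  # Bob Lose
--         if numArrows > aliceArrows[k]:
--             maxScore = max(maxScore, dp(k+1, numArrows-aliceArrows[k]-1) + k)  # Bob Win
--         return maxScore
--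
--     # backtracking
--     ans = [0] * 12
--     remainBobArrows = numArrows
--     for k in range(12):
--         if dp(k, numArrows) != dp(k+1, numArrows): # If Bob win
--             ans[k] = aliceArrows[k] + 1
--             numArrows -= ans[k]
--             remainBobArrows -= ans[k]
--
--     ans[0] += remainBobArrows  # In case of having remain arrows then it means in all sections Bob always win
--     # then we can distribute the remain to any section, here we simple choose first section.
--     return ans
-- ===== SOURCE B (Python) =====
-- from typing import List
-- from functools import lru_cache
--
-- def maximumBobPoints2(numArrows: int, aliceArrows: List[int]) -> List[int]:
--     # One memoized pass that returns the optimal score TOGETHER with Bob's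
--     # arrow assignment for sections k..11, so no separate backtracking phase.
--     @lru_cache(None)
--     def best(k: int, a: int):
--         if k == 12:
--             return (0, ())
--         s1, l1 = best(k + 1, a)                 # lose section k
--         if a > 0 and a > aliceArrows[k]:
--             cost = aliceArrows[k] + 1
--             s2, l2 = best(k + 1, a - cost)      # win section k
--             if s2 + k > s1:                     # win only on strict improvement
--                 return (s2 + k, (cost,) + l2)
--         return (s1, (0,) + l1)
--
--     _, lst = best(0, numArrows)
--     ans = list(lst)
--     ans[0] += numArrows - sum(ans)              # leftover arrows go to section 0
--     return ans
-- ===== Notes on version B (the rewrite author's own statement) =====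
-- stated objective: alternative
-- what changed: Replaces A's two-phase design (memoized score-only dp followed by a separate backtracking loop that re-queries dp to rediscover the choices) by a single memoized pass whose recursion returns the optimal score together with the chosen arrow assignment, so the backtracking phase disappears.
import Mathlib
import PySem

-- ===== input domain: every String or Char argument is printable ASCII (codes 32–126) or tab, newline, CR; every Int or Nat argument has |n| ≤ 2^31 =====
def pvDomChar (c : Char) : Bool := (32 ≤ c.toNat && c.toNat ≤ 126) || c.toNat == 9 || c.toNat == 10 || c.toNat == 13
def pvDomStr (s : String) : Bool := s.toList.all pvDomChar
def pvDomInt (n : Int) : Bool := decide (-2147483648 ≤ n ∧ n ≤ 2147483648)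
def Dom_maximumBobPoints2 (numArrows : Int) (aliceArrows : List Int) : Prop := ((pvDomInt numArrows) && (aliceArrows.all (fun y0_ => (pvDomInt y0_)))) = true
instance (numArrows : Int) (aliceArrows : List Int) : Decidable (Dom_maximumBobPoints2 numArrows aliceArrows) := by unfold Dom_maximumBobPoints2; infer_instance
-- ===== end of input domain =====

-- B replaces A's memoized dp + separate backtracking pass by one recursion that
-- returns the optimal score together with the chosen arrow list (alternative
-- decomposition, same asymptotic cost); return values agree on Pre_.

-- ===== PORT A =====
-- Python's inner dp tests `k == 12`; dp is only ever invoked with 0 ≤ k ≤ 12,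
-- where `12 ≤ k` coincides (written so for termination).
def dpA (alice : List Int) (k a : Int) : Int :=
  if 12 ≤ k ∨ a ≤ 0 then 0
  else
    let lose := dpA alice (k + 1) a  -- Bob Lose
    if PySem.List.pyGetD alice k 0 < a then
      max lose (dpA alice (k + 1) (a - PySem.List.pyGetD alice k 0 - 1) + k)  -- Bob Win
    else lose
termination_by (12 - k).toNat
decreasing_by all_goals omega

-- one iteration of A's backtracking loop; state = (ans, numArrows, remainBobArrows)
def btStep (alice : List Int) (st : List Int × Int × Int) (k : Int) : List Int × Int × Int :=
  if dpA alice k st.2.1 ≠ dpA alice (k + 1) st.2.1 then  -- If Bob win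
    let c := PySem.List.pyGetD alice k 0 + 1
    (PySem.List.pySetD st.1 k c, st.2.1 - c, st.2.2 - c)
  else st

def maximumBobPoints2 (numArrows : Int) (aliceArrows : List Int) : List Int :=
  let st := (PySem.List.pyRange 0 12 1).foldl (btStep aliceArrows)
              (List.replicate 12 (0 : Int), numArrows, numArrows)
  PySem.List.pySetD st.1 0 (PySem.List.pyGetD st.1 0 0 + st.2.2)  -- ans[0] += remainBobArrows

-- ===== PORT B =====
-- Python B's best tests `k == 12`; best is only ever invoked with 0 ≤ k ≤ 12.
def bestB (alice : List Int) (k a : Int) : Int × List Int :=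
  if 12 ≤ k then (0, [])
  else
    let p1 := bestB alice (k + 1) a  -- lose section k
    if 0 < a ∧ PySem.List.pyGetD alice k 0 < a then
      let cost := PySem.List.pyGetD alice k 0 + 1
      let p2 := bestB alice (k + 1) (a - cost)  -- win section k
      if p1.1 < p2.1 + k then (p2.1 + k, cost :: p2.2)  -- win only on strict improvement
      else (p1.1, 0 :: p1.2)
    else (p1.1, 0 :: p1.2)
termination_by (12 - k).toNat
decreasing_by all_goals omega

def maximumBobPoints2_alt (numArrows : Int) (aliceArrows : List Int) : List Int :=
  let lst := (bestB aliceArrows 0 numArrows).2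
  PySem.List.pySetD lst 0 (PySem.List.pyGetD lst 0 0 + (numArrows - lst.sum))

-- ===== PRECONDITION & SPEC =====
-- Pre_ = exactly the inputs where Python A returns: with numArrows > 0 and fewer
-- than 12 sections, A's dp raises IndexError; with numArrows ≤ 0 it never indexes.
def Pre_maximumBobPoints2 (numArrows : Int) (aliceArrows : List Int) : Prop :=
  12 ≤ aliceArrows.length ∨ numArrows ≤ 0
instance (numArrows : Int) (aliceArrows : List Int) : Decidable (Pre_maximumBobPoints2 numArrows aliceArrows) := by unfold Pre_maximumBobPoints2; infer_instance

def pvWitness_maximumBobPoints2 : Int × List Int := (9, [1, 0, 2, 0, 1, 0, 0, 3, 0, 0, 2, 1])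

def Spec_maximumBobPoints2 (numArrows : Int) (aliceArrows : List Int) (out : List Int) : Prop := out = maximumBobPoints2_alt numArrows aliceArrows
instance (numArrows : Int) (aliceArrows : List Int) (out : List Int) : Decidable (Spec_maximumBobPoints2 numArrows aliceArrows out) := by unfold Spec_maximumBobPoints2; infer_instance

-- ===== CLAIM (what is proved, stated in full; the proofs are below) =====
def Claim_equal_maximumBobPoints2 : Prop := ∀ (numArrows : Int) (aliceArrows : List Int), Dom_maximumBobPoints2 numArrows aliceArrows → Pre_maximumBobPoints2 numArrows aliceArrows → Spec_maximumBobPoints2 numArrows aliceArrows (maximumBobPoints2 numArrows aliceArrows)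

-- ===== LEMMAS AND PROOFS =====

theorem set_append_cons (pre z : List Int) (c : Int) :
    (pre ++ (0 : Int) :: z).set pre.length c = pre ++ c :: z := by
  induction pre with
  | nil => rfl
  | cons x xs ih => simp [ih]

-- B's score component equals A's dp.
theorem bestB_fst (alice : List Int) (k a : Int) : (bestB alice k a).1 = dpA alice k a := by
  by_cases hk : 12 ≤ k
  · rw [bestB.eq_def, dpA.eq_def]; simp [hk]
  · have ih1 := bestB_fst alice (k + 1) a
    by_cases ha : a ≤ 0
    · have hz : dpA alice (k + 1) a = 0 := by rw [dpA.eq_def]; simp [ha]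
      have hng : ¬ (0 < a ∧ PySem.List.pyGetD alice k 0 < a) := by omega
      rw [bestB.eq_def, dpA.eq_def]
      simp [hk, ha, hng, ih1, hz]
    · by_cases hg : PySem.List.pyGetD alice k 0 < a
      · have ih2 := bestB_fst alice (k + 1) (a - (PySem.List.pyGetD alice k 0 + 1))
        have he : a - PySem.List.pyGetD alice k 0 - 1
            = a - (PySem.List.pyGetD alice k 0 + 1) := by ring
        rw [bestB.eq_def, dpA.eq_def]
        simp only [if_neg hk, if_neg (show ¬ (12 ≤ k ∨ a ≤ 0) by omega),
          if_pos (show 0 < a ∧ PySem.List.pyGetD alice k 0 < a from ⟨by omega, hg⟩),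
          if_pos hg, he]
        rw [ih1, ih2]
        split_ifs <;> omega
      · rw [bestB.eq_def, dpA.eq_def]
        simp [hk, ha, hg, ih1]
termination_by (12 - k).toNat
decreasing_by all_goals omega

-- A's backtracking decision at (k, a) is exactly "winning strictly beats losing".
theorem dpA_decide (alice : List Int) (k a : Int) (hk : ¬ 12 ≤ k) :
    (dpA alice k a ≠ dpA alice (k + 1) a)
      ↔ (0 < a ∧ PySem.List.pyGetD alice k 0 < a ∧
          dpA alice (k + 1) a < dpA alice (k + 1) (a - PySem.List.pyGetD alice k 0 - 1) + k) := by
  by_cases ha : a ≤ 0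
  · have h1 : dpA alice k a = 0 := by rw [dpA.eq_def]; simp [ha]
    have h2 : dpA alice (k + 1) a = 0 := by rw [dpA.eq_def]; simp [ha]
    simp [h1, h2]; omega
  · by_cases hg : PySem.List.pyGetD alice k 0 < a
    · have h1 : dpA alice k a
          = max (dpA alice (k + 1) a)
              (dpA alice (k + 1) (a - PySem.List.pyGetD alice k 0 - 1) + k) := by
        conv_lhs => rw [dpA.eq_def]
        simp [hk, ha, hg]
      rw [h1]
      constructor
      · intro h; exact ⟨by omega, hg, by omega⟩
      · intro h; omega
    · have h1 : dpA alice k a = dpA alice (k + 1) a := by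
        conv_lhs => rw [dpA.eq_def]
        simp [hk, ha, hg]
      simp [h1, hg]

-- The backtracking fold from section k reproduces B's chosen list and spending.
theorem foldBT (alice : List Int) (k a r : Int) (pre : List Int)
    (hk0 : 0 ≤ k) (hk : k ≤ 12) (hpre : pre.length = k.toNat) :
    (PySem.List.pyRange k 12 1).foldl (btStep alice)
        (pre ++ List.replicate (12 - k).toNat 0, a, r)
      = (pre ++ (bestB alice k a).2,
         a - (bestB alice k a).2.sum, r - (bestB alice k a).2.sum) := by
  by_cases hke : 12 ≤ k
  · have hnil : PySem.List.pyRange k 12 1 = [] := PySem.List.pyRange_one_eq_nil hke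
    have hb : bestB alice k a = (0, []) := by rw [bestB.eq_def]; simp [hke]
    have hz : (12 - k).toNat = 0 := by omega
    simp [hnil, hb, hz]
  · have hcons := PySem.List.pyRange_one_cons (show k < 12 by omega)
    have hrep : (12 - k).toNat = ((12 - (k + 1)).toNat) + 1 := by omega
    have hsplit : pre ++ List.replicate (12 - k).toNat 0
        = pre ++ (0 : Int) :: List.replicate (12 - (k + 1)).toNat 0 := by
      rw [hrep]; rfl
    rw [hcons, List.foldl_cons, hsplit]
    have hdec := dpA_decide alice k a hke
    have hs1 := bestB_fst alice (k + 1) a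
    have hs2 := bestB_fst alice (k + 1) (a - (PySem.List.pyGetD alice k 0 + 1))
    have he : a - (PySem.List.pyGetD alice k 0 + 1)
        = a - PySem.List.pyGetD alice k 0 - 1 := by ring
    by_cases hw : 0 < a ∧ PySem.List.pyGetD alice k 0 < a ∧
        dpA alice (k + 1) a < dpA alice (k + 1) (a - PySem.List.pyGetD alice k 0 - 1) + k
    · -- Bob wins section k in both programs
      have hstep : btStep alice (pre ++ (0 : Int) :: List.replicate (12 - (k + 1)).toNat 0, a, r) k
          = ((pre ++ [PySem.List.pyGetD alice k 0 + 1]) ++ List.replicate (12 - (k + 1)).toNat 0,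
             a - (PySem.List.pyGetD alice k 0 + 1), r - (PySem.List.pyGetD alice k 0 + 1)) := by
        rw [btStep]
        simp only [if_pos (hdec.mpr hw)]
        rw [PySem.List.pySetD_of_nonneg _ _ hk0]
        have hlen : k.toNat = pre.length := hpre.symm
        rw [hlen, set_append_cons]
        simp
      rw [hstep]
      have ih := foldBT alice (k + 1) (a - (PySem.List.pyGetD alice k 0 + 1))
          (r - (PySem.List.pyGetD alice k 0 + 1)) (pre ++ [PySem.List.pyGetD alice k 0 + 1])
          (by omega) (by omega) (by simp [hpre]; omega)
      rw [ih]
      have hwin : (bestB alice (k + 1) a).1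
          < (bestB alice (k + 1) (a - (PySem.List.pyGetD alice k 0 + 1))).1 + k := by
        rw [hs1, hs2, he]; exact hw.2.2
      conv_rhs => rw [bestB.eq_def]
      simp only [if_neg hke, if_pos (show 0 < a ∧ PySem.List.pyGetD alice k 0 < a from ⟨hw.1, hw.2.1⟩),
        if_pos hwin]
      simp only [List.append_assoc, List.cons_append, List.nil_append, List.sum_cons,
        Prod.mk.injEq]
      refine ⟨by simp, by ring, by ring⟩
    · -- Bob loses section k in both programs
      have hstep : btStep alice (pre ++ (0 : Int) :: List.replicate (12 - (k + 1)).toNat 0, a, r) k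
          = ((pre ++ [(0 : Int)]) ++ List.replicate (12 - (k + 1)).toNat 0, a, r) := by
        rw [btStep]
        simp only [if_neg (fun h => hw (hdec.mp h))]
        simp
      rw [hstep]
      have ih := foldBT alice (k + 1) a r (pre ++ [(0 : Int)])
          (by omega) (by omega) (by simp [hpre]; omega)
      rw [ih]
      conv_rhs => rw [bestB.eq_def]
      by_cases hg : 0 < a ∧ PySem.List.pyGetD alice k 0 < a
      · have hnw : ¬ (bestB alice (k + 1) a).1
            < (bestB alice (k + 1) (a - (PySem.List.pyGetD alice k 0 + 1))).1 + k := by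
          rw [hs1, hs2, he]
          intro hc
          exact hw ⟨hg.1, hg.2, hc⟩
        simp only [if_neg hke, if_pos hg, if_neg hnw]
        simp only [List.append_assoc, List.cons_append, List.nil_append, List.sum_cons,
          Prod.mk.injEq]
        refine ⟨by simp, by ring, by ring⟩
      · simp only [if_neg hke, if_neg hg]
        simp only [List.append_assoc, List.cons_append, List.nil_append, List.sum_cons,
          Prod.mk.injEq]
        refine ⟨by simp, by ring, by ring⟩
termination_by (12 - k).toNat
decreasing_by all_goals omega

-- ===== VERDICT (by name: the statement is the Claim_ definition above) =====
theorem maximumBobPoints2_spec : Claim_equal_maximumBobPoints2 := by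
  intro numArrows aliceArrows _ _
  show _ = _
  rw [maximumBobPoints2, maximumBobPoints2_alt]
  have h := foldBT aliceArrows 0 numArrows numArrows [] (by omega) (by omega) (by simp)
  simp only [Int.sub_zero, show (12:Int).toNat = 12 from rfl, List.nil_append] at h
  rw [h]
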